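-- pv_equiv track=rewrite | github.com/kevm314/Connect-4-AI | ConnectFour_bench.py | find_battle_front
-- ===== SOURCE A (Python) =====
-- def find_battle_front(game_board):
--
--     #set the respective counters
--     row_counter = 0
--
--     #battle front has the first unmarked position
--     #ready to play in any column
--     battle_front = [10 for x in range(7)]
--
--     #for efficiency, when battlefront entires are filled, terminate search
--     #do this using a counter of entries
--     num_entries = 7
--
--     for r in game_board:
--
--         #reset after iterating through a 'row' of columns
--         column_counter = 0
--
--         for c in r:
--             #check empty position and if
--             #this position is truly in the battlefront
--             if c == '.' and battle_front[column_counter] == 10: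
--                 #set the current empty position as the current row index
--                 battle_front[column_counter] = row_counter
--                 num_entries -= 1
--
--             column_counter += 1
--
--
--
--         row_counter += 1
--
--         #check if battle front is filled after every row iterations
--         if num_entries == 0:
--             break
--
--     return battle_front
-- ===== SOURCE B (Python) =====
-- def find_battle_front(game_board):
--     # Column-major scan: for each of the 7 columns independently, return the
--     # index of the first row whose cell in that column is '.', defaulting to 10.
--     return [next((r for r, row in enumerate(game_board)
--                   if col < len(row) and row[col] == '.'), 10)
--             for col in range(7)]
-- ===== Notes on version B (the rewrite author's own statement) =====
-- stated objective: simpler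
-- what changed: Replaced the row-major nested loop with mutable battle_front/num_entries/early-break state by seven independent column-major first-match scans (one comprehension, no mutable state).
-- intended difference: On boards where some column's first '.' lies exactly at row index 10 (colliding with A's sentinel 10) and that column is re-hit by a later '.' that A's loop actually reaches (taking the earliest such re-hit row m, some column still has no '.' before row m, so the num_entries==0 break cannot fire first), A overwrites the entry and returns the later row index, while B returns 10, the true first empty row, the intended value. — e.g. on find_battle_front([["X"], ["X"], ["X"], ["X"], ["X"], ["X"], ["X"], ["X"], ["X"], ["X"], ["."], ["."]]): A returns [11, 10, 10, 10, 10, 10, 10], B returns [10, 10, 10, 10, 10, 10, 10]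
import Mathlib
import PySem

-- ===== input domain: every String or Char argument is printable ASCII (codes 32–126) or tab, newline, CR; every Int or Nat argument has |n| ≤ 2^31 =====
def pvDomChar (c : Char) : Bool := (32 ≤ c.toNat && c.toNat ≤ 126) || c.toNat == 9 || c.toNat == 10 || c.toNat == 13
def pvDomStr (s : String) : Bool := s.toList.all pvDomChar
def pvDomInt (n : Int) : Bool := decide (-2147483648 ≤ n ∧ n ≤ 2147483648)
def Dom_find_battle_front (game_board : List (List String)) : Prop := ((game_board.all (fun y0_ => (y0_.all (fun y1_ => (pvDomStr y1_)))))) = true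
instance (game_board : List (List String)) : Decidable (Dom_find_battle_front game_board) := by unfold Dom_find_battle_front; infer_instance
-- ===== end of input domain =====

-- B replaces A's row-major nested loop with mutable battle_front/num_entries state and early break
-- by seven independent column-major first-match scans (simpler; equal on the return value only).

-- ===== PORT A =====
-- inner 'for c in r' loop: state (battle_front, column_counter, num_entries); none = IndexError
def fbfInner : List String → List Int → Int → Int → Int → Option (List Int × Int)
  | [], bf, _, ne, _ => some (bf, ne)
  | c :: cs, bf, cc, ne, rc =>
    if c = "." then
      match PySem.List.pyGet? bf cc with
      | none => none
      | some v =>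
        if v = 10 then
          match PySem.List.pySet? bf cc rc with
          | none => none
          | some bf' => fbfInner cs bf' (cc + 1) (ne - 1) rc
        else fbfInner cs bf (cc + 1) ne rc
    else fbfInner cs bf (cc + 1) ne rc

-- outer 'for r in game_board' loop with the num_entries == 0 break
def fbfOuter : List (List String) → List Int → Int → Int → Option (List Int)
  | [], bf, _, _ => some bf
  | r :: rs, bf, ne, rc =>
    match fbfInner r bf 0 ne rc with
    | none => none
    | some (bf', ne') => if ne' = 0 then some bf' else fbfOuter rs bf' ne' (rc + 1)

def find_battle_front (game_board : List (List String)) : List Int :=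
  (fbfOuter game_board ((List.range 7).map (fun _ => (10 : Int))) 7 0).getD []

-- ===== PORT B =====
-- next((r for r, row in enumerate(game_board) if col < len(row) and row[col] == '.'), 10)
def fbfFirstDot (col : Nat) : List (List String) → Int → Int
  | [], _ => 10
  | row :: rest, r => if row[col]? = some "." then r else fbfFirstDot col rest (r + 1)

def find_battle_front_alt (game_board : List (List String)) : List Int :=
  (List.range 7).map (fun col => fbfFirstDot col game_board 0)

-- ===== PRECONDITION & SPEC =====
-- Pre_ excludes boards having a '.' at a cell index ≥ 7 in some row: there A raises
-- IndexError on battle_front[column_counter] (unless its early break happens to stop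
-- before the offending row, in which case A and B agree anyway).
def Pre_find_battle_front (game_board : List (List String)) : Prop :=
  ∀ r ∈ game_board, ∀ c ∈ r.drop 7, c ≠ "."
instance (game_board : List (List String)) : Decidable (Pre_find_battle_front game_board) := by
  unfold Pre_find_battle_front; infer_instance

def pvWitness_find_battle_front : List (List String) := [[".", "X"]]

-- On boards where some column's first '.' lies exactly at row index 10 (A's sentinel) and that
-- column has another '.' in a later row reached before A's num_entries==0 break (i.e. taking the
-- earliest such re-hit row m, some column has no '.' before row m), A overwrites the entry and
-- returns the later row index there, while B returns 10, the true first empty row, the intended value.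
def D_find_battle_front (game_board : List (List String)) : Prop :=
  ∃ j ∈ List.range 7, ∃ i ∈ List.range game_board.length,
    game_board.findIdx? (fun row => row[j]? == some ".") = some 10 ∧
    (game_board.drop 11).findIdx? (fun row => row[j]? == some ".") = some i ∧
    (∀ c ∈ List.range 7, ∀ i' ∈ List.range game_board.length,
        game_board.findIdx? (fun row => row[c]? == some ".") = some 10 →
        (game_board.drop 11).findIdx? (fun row => row[c]? == some ".") = some i' → i ≤ i') ∧
    (∃ c ∈ List.range 7, ∀ row ∈ game_board.take (11 + i), ¬ (row[c]? = some "."))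
instance (game_board : List (List String)) : Decidable (D_find_battle_front game_board) := by
  unfold D_find_battle_front; infer_instance

def Spec_find_battle_front (game_board : List (List String)) (out : List Int) : Prop :=
  ¬ D_find_battle_front game_board → out = find_battle_front_alt game_board
instance (game_board : List (List String)) (out : List Int) : Decidable (Spec_find_battle_front game_board out) := by
  unfold Spec_find_battle_front; infer_instance

def pvDiffWitness_find_battle_front : List (List String) :=
  [["X"], ["X"], ["X"], ["X"], ["X"], ["X"], ["X"], ["X"], ["X"], ["X"], ["."], ["."]]
def pvDiffWitnessOut_find_battle_front : (List Int) × (List Int) :=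
  ([11, 10, 10, 10, 10, 10, 10], [10, 10, 10, 10, 10, 10, 10])

-- ===== CLAIM =====
def Claim_unchanged_find_battle_front : Prop := ∀ (game_board : List (List String)), Dom_find_battle_front game_board → Pre_find_battle_front game_board → Spec_find_battle_front game_board (find_battle_front game_board)
def Claim_exact_find_battle_front : Prop := ∀ (game_board : List (List String)), Dom_find_battle_front game_board → Pre_find_battle_front game_board → D_find_battle_front game_board → find_battle_front game_board ≠ find_battle_front_alt game_board
def Claim_changed_find_battle_front : Prop := Dom_find_battle_front (pvDiffWitness_find_battle_front) ∧ Pre_find_battle_front (pvDiffWitness_find_battle_front) ∧ D_find_battle_front (pvDiffWitness_find_battle_front) ∧ find_battle_front (pvDiffWitness_find_battle_front) = pvDiffWitnessOut_find_battle_front.1 ∧ find_battle_front_alt (pvDiffWitness_find_battle_front) = pvDiffWitnessOut_find_battle_front.2 ∧ pvDiffWitnessOut_find_battle_front.1 ≠ pvDiffWitnessOut_find_battle_front.2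

-- ===== LEMMAS AND PROOFS =====

-- structural (index-free) reformulation of A's inner loop, starting at column cc = s-offset
def fbfInner0 : List String → List Int → Int → Int → Option (List Int × Int)
  | [], s, ne, _ => some (s, ne)
  | c :: cs, [], ne, rc => if c = "." then none else fbfInner0 cs [] ne rc
  | c :: cs, b :: bs, ne, rc =>
    if c = "." then
      if b = 10 then (fbfInner0 cs bs (ne - 1) rc).map (fun z => (rc :: z.1, z.2))
      else (fbfInner0 cs bs ne rc).map (fun z => (b :: z.1, z.2))
    else (fbfInner0 cs bs ne rc).map (fun z => (b :: z.1, z.2))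

def fbfUpd : List String → List Int → Int → List Int
  | _, [], _ => []
  | [], b :: bs, _ => b :: bs
  | c :: cs, b :: bs, rc => (if c = "." ∧ b = 10 then rc else b) :: fbfUpd cs bs rc

def fbfWrote : List String → List Int → Nat
  | _, [] => 0
  | [], _ :: _ => 0
  | c :: cs, b :: bs => (if c = "." ∧ b = 10 then 1 else 0) + fbfWrote cs bs

lemma fbfInner0_nil (r : List String) (ne rc : Int) :
    fbfInner0 r [] ne rc = if r.all (fun c => !(c == ".")) then some (([] : List Int), ne) else none := by
  induction r with
  | nil => simp [fbfInner0]
  | cons c cs ih =>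
    by_cases hc : c = "." <;> simp [fbfInner0, hc, ih]

lemma fbfInner_oob (r : List String) : ∀ (bf : List Int) (cc ne rc : Int), (bf.length : Int) ≤ cc →
    fbfInner r bf cc ne rc = if r.all (fun c => !(c == ".")) then some (bf, ne) else none := by
  induction r with
  | nil => intro bf cc ne rc h; simp [fbfInner]
  | cons c cs ih =>
    intro bf cc ne rc h
    have hget : PySem.List.pyGet? bf cc = none := by
      rw [PySem.List.pyGet?_eq_none_iff]
      simp only [PySem.Raise.InRange]
      omega
    by_cases hc : c = "." <;>
      simp [fbfInner, hc, hget, ih bf (cc + 1) ne rc (by omega)]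

lemma fbfInner_decomp (r : List String) : ∀ (p s : List Int) (ne rc : Int),
    fbfInner r (p ++ s) ((p.length : Nat) : Int) ne rc
      = (fbfInner0 r s ne rc).map (fun z => (p ++ z.1, z.2)) := by
  induction r with
  | nil => intro p s ne rc; simp [fbfInner, fbfInner0]
  | cons c cs ih =>
    intro p s ne rc
    cases s with
    | nil =>
      rw [fbfInner_oob (c :: cs) (p ++ []) _ ne rc (by simp), fbfInner0_nil]
      by_cases hc : c = "." <;> by_cases hall : cs.all (fun c => !(c == ".")) <;>
        simp [hc, hall, List.all_cons]
    | cons b bs =>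
      have hget := PySem.List.pyGet?_append_length p bs b
      have hset : PySem.List.pySet? (p ++ b :: bs) ((p.length : Nat) : Int) rc
          = some (p ++ rc :: bs) := by
        rw [PySem.List.pySet?_natCast _ _ _ (by simp)]
        congr 1
        simp
      have h2 : ∀ x : Int, p ++ x :: bs = (p ++ [x]) ++ bs := by intro x; simp
      have h1 : ∀ x : Int, ((p.length : Nat) : Int) + 1 = (((p ++ [x]).length : Nat) : Int) := by
        intro x; simp
      by_cases hc : c = "."
      · subst hc
        by_cases hb : b = (10 : Int)
        · subst hb
          simp only [fbfInner, fbfInner0, hget, hset, reduceIte]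
          rw [h1 rc, h2 rc, ih (p ++ [rc]) bs (ne - 1) rc]
          cases fbfInner0 cs bs (ne - 1) rc <;> simp
        · simp only [fbfInner, fbfInner0, hget, reduceIte, if_neg hb]
          rw [h1 b, h2 b, ih (p ++ [b]) bs ne rc]
          cases fbfInner0 cs bs ne rc <;> simp
      · simp only [fbfInner, fbfInner0, if_neg hc]
        rw [h1 b, h2 b, ih (p ++ [b]) bs ne rc]
        cases fbfInner0 cs bs ne rc <;> simp

lemma fbfUpd_length : ∀ (r : List String) (s : List Int) (rc : Int),
    (fbfUpd r s rc).length = s.length := by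
  intro r
  induction r with
  | nil => intro s rc; cases s <;> simp [fbfUpd]
  | cons c cs ih => intro s rc; cases s <;> simp [fbfUpd, ih]

lemma fbfUpd_getD : ∀ (r : List String) (s : List Int) (rc : Int) (j : Nat), j < s.length →
    (fbfUpd r s rc).getD j 0 = if r[j]? = some "." ∧ s.getD j 0 = 10 then rc else s.getD j 0 := by
  intro r
  induction r with
  | nil =>
    intro s rc j hj
    cases s with
    | nil => simp at hj
    | cons b bs => simp [fbfUpd]
  | cons c cs ih =>
    intro s rc j hj
    cases s with
    | nil => simp at hj
    | cons b bs =>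
      cases j with
      | zero => simp [fbfUpd]
      | succ j =>
        simp only [fbfUpd, List.getD_cons_succ, List.getElem?_cons_succ]
        exact ih bs rc j (by simpa using hj)

lemma fbfWrote_eq : ∀ (s : List Int) (r : List String),
    fbfWrote r s
      = (List.range s.length).countP (fun j => decide (r[j]? = some "." ∧ s.getD j 0 = 10)) := by
  intro s
  induction s with
  | nil => intro r; cases r <;> simp [fbfWrote]
  | cons b bs ih =>
    intro r
    cases r with
    | nil =>
      simp [fbfWrote]
    | cons c cs =>
      simp only [fbfWrote, List.length_cons, List.range_succ_eq_map, List.countP_cons,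
        List.countP_map]
      have h1 : (List.range bs.length).countP
          ((fun j => decide ((c :: cs)[j]? = some "." ∧ (b :: bs).getD j 0 = 10)) ∘ Nat.succ)
          = (List.range bs.length).countP (fun j => decide (cs[j]? = some "." ∧ bs.getD j 0 = 10)) := by
        apply List.countP_congr
        intro j _
        simp
      rw [h1, ← ih cs]
      by_cases h : c = "." ∧ b = 10
      · simp [h]; omega
      · simp [h]

lemma fbfInner0_eq : ∀ (r : List String) (s : List Int) (ne rc : Int),
    (∀ i : Nat, r[i]? = some "." → i < s.length) →
    fbfInner0 r s ne rc = some (fbfUpd r s rc, ne - ((fbfWrote r s : Nat) : Int)) := by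
  intro r
  induction r with
  | nil => intro s ne rc _; cases s <;> simp [fbfInner0, fbfUpd, fbfWrote]
  | cons c cs ih =>
    intro s ne rc hs
    cases s with
    | nil =>
      have hc : ¬ (c = ".") := by
        intro hc; have := hs 0 (by simp [hc]); simp at this
      have hcs : ∀ i : Nat, cs[i]? = some "." → i < ([] : List Int).length := by
        intro i hi; have := hs (i + 1) (by simpa using hi); simp at this
      simp [fbfInner0, hc, fbfUpd, fbfWrote, ih [] ne rc hcs]
    | cons b bs =>
      have hcs : ∀ i : Nat, cs[i]? = some "." → i < bs.length := by
        intro i hi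
        have := hs (i + 1) (by simpa using hi)
        simpa using this
      by_cases hc : c = "."
      · subst hc
        by_cases hb : b = (10 : Int)
        · subst hb
          simp only [fbfInner0, reduceIte, ih bs (ne - 1) rc hcs, Option.map_some,
            fbfUpd, fbfWrote, Option.some.injEq, Prod.mk.injEq]
          refine ⟨rfl, by simp; omega⟩
        · have hcond : ¬ (("." : String) = "." ∧ b = 10) := fun h => hb h.2
          simp only [fbfInner0, reduceIte, if_neg hb, ih bs ne rc hcs, Option.map_some,
            fbfUpd, fbfWrote, Option.some.injEq, Prod.mk.injEq]
          simp [hb]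
      · have hcond : ¬ (c = "." ∧ b = 10) := fun h => hc h.1
        simp only [fbfInner0, if_neg hc, ih bs ne rc hcs, Option.map_some,
          fbfUpd, fbfWrote, Option.some.injEq, Prod.mk.injEq]
        simp [hc]

lemma fbfFirstDot_eq (j : Nat) : ∀ (l : List (List String)) (a : Int),
    fbfFirstDot j l a
      = (l.findIdx? (fun row => row[j]? == some ".")).elim 10 (fun i => a + (i : Int)) := by
  intro l
  induction l with
  | nil => intro a; simp [fbfFirstDot]
  | cons row rest ih =>
    intro a
    by_cases h : row[j]? = some "."
    · simp [fbfFirstDot, h, List.findIdx?_cons]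
    · simp only [fbfFirstDot, if_neg h, ih (a + 1), List.findIdx?_cons]
      have hb : (row[j]? == some ".") = false := by simpa using h
      rw [hb]
      simp only [Bool.false_eq_true, if_false]
      cases rest.findIdx? (fun row => row[j]? == some ".") <;> simp
      omega

lemma fbf_countP_split {α : Type} (l : List α) (p q : α → Bool) :
    l.countP p = l.countP (fun x => p x && q x) + l.countP (fun x => p x && !q x) := by
  induction l with
  | nil => simp
  | cons x xs ih =>
    cases hp : p x <;> cases hq : q x <;> simp [hp, hq, ih] <;> omega

lemma fbf_findIdx?_take_some {l : List (List String)} {p : List String → Bool} {n k : Nat}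
    (h : (l.take n).findIdx? p = some k) : l.findIdx? p = some k := by
  conv_lhs => rw [← List.take_append_drop n l]
  rw [List.findIdx?_append, h]
  rfl

lemma fbf_findIdx?_full_to_take {l : List (List String)} {p : List String → Bool} {n k : Nat}
    (h : l.findIdx? p = some k) (hk : k < n) : (l.take n).findIdx? p = some k := by
  rw [List.findIdx?_eq_some_iff_getElem] at h ⊢
  obtain ⟨hlen, hp, hbef⟩ := h
  refine ⟨by simp [List.length_take]; omega, ?_, ?_⟩
  · rw [List.getElem_take]; exact hp
  · intro k' hk'
    rw [List.getElem_take]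
    exact hbef k' hk'

lemma fbf_findIdx?_le {α : Type} (p : α → Bool) : ∀ (l : List α) (k : Nat) (x : α),
    l[k]? = some x → p x → ∃ i, i ≤ k ∧ l.findIdx? p = some i := by
  intro l
  induction l with
  | nil => intro k x h _; simp at h
  | cons a as ih =>
    intro k x h hp
    by_cases ha : p a
    · exact ⟨0, Nat.zero_le _, by simp [List.findIdx?_cons, ha]⟩
    · cases k with
      | zero =>
        simp at h
        subst h
        exact absurd hp ha
      | succ k =>
        simp only [List.getElem?_cons_succ] at h
        obtain ⟨i, hik, hi⟩ := ih k x h hp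
        refine ⟨i + 1, by omega, ?_⟩
        simp [List.findIdx?_cons, ha, hi]

lemma fbf_pre_hits (gb : List (List String)) (hpre : Pre_find_battle_front gb) :
    ∀ r ∈ gb, ∀ i : Nat, r[i]? = some "." → i < 7 := by
  intro r hr i hi
  by_contra h
  have hdot : ("." : String) ∈ r.drop 7 := by
    apply List.mem_of_getElem? (i := i - 7)
    rw [List.getElem?_drop]
    have h7 : 7 + (i - 7) = i := by omega
    rw [h7]
    exact hi
  exact hpre r hr "." hdot rfl

-- a sentinel re-hit reached while some column is still empty puts the board inside D_
lemma fbfD_of (gb : List (List String)) (j rc : Nat) (r : List String)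
    (hj : j < 7)
    (hfind : (gb.take rc).findIdx? (fun row => row[j]? == some ".") = some 10)
    (hr : gb[rc]? = some r) (hhit : r[j]? = some ".")
    (hrun : ∃ c < 7, ∀ row ∈ gb.take rc, ¬ (row[c]? = some ".")) :
    D_find_battle_front gb := by
  have hrc11 : 11 ≤ rc := by
    obtain ⟨h10, -, -⟩ := List.findIdx?_eq_some_iff_getElem.mp hfind
    simp [List.length_take] at h10
    omega
  have hjfull : gb.findIdx? (fun row => row[j]? == some ".") = some 10 :=
    fbf_findIdx?_take_some hfind
  have hdropj : (gb.drop 11)[rc - 11]? = some r := by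
    rw [List.getElem?_drop]
    have h11 : 11 + (rc - 11) = rc := by omega
    rw [h11]
    exact hr
  obtain ⟨ij, hij_le, hij⟩ :=
    fbf_findIdx?_le (fun row => row[j]? == some ".") (gb.drop 11) (rc - 11) r hdropj
      (by simpa using hhit)
  have hjL : ij ∈ (List.range 7).filterMap (fun c =>
      if gb.findIdx? (fun row => row[c]? == some ".") = some 10
      then (gb.drop 11).findIdx? (fun row => row[c]? == some ".") else none) :=
    List.mem_filterMap.mpr ⟨j, by simpa using hj, by rw [if_pos hjfull]; exact hij⟩
  obtain ⟨imin, hmin⟩ : ∃ m, ((List.range 7).filterMap (fun c =>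
      if gb.findIdx? (fun row => row[c]? == some ".") = some 10
      then (gb.drop 11).findIdx? (fun row => row[c]? == some ".") else none)).min? = some m := by
    cases hmn : ((List.range 7).filterMap (fun c =>
        if gb.findIdx? (fun row => row[c]? == some ".") = some 10
        then (gb.drop 11).findIdx? (fun row => row[c]? == some ".") else none)).min? with
    | some m => exact ⟨m, rfl⟩
    | none =>
      rw [List.min?_eq_none_iff] at hmn
      rw [hmn] at hjL
      simp at hjL
  rw [List.min?_eq_some_iff] at hmin
  obtain ⟨hminmem, hminle⟩ := hmin
  obtain ⟨cstar, hcmem, hcdef⟩ := List.mem_filterMap.mp hminmem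
  have hc7 : cstar < 7 := by simpa using hcmem
  have hcsent : gb.findIdx? (fun row => row[cstar]? == some ".") = some 10 := by
    by_contra hn
    rw [if_neg hn] at hcdef
    simp at hcdef
  rw [if_pos hcsent] at hcdef
  have himin_lt : imin < gb.length := by
    obtain ⟨hlt, -, -⟩ := List.findIdx?_eq_some_iff_getElem.mp hcdef
    simp at hlt
    omega
  refine ⟨cstar, by simpa using hc7, imin, by simpa using himin_lt, hcsent, hcdef, ?_, ?_⟩
  · intro c hc i' _ hcfull hcsecond
    exact hminle i'
      (List.mem_filterMap.mpr ⟨c, hc, by rw [if_pos hcfull]; exact hcsecond⟩)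
  · obtain ⟨c0, hc0, hnone⟩ := hrun
    refine ⟨c0, by simpa using hc0, ?_⟩
    intro row hrow
    apply hnone
    have h1 : 11 + imin ≤ rc := by
      have := hminle ij hjL
      omega
    have h2 : List.take (11 + imin) gb = List.take (11 + imin) (List.take rc gb) := by
      rw [List.take_take]
      congr 1
      omega
    rw [h2] at hrow
    exact List.mem_of_mem_take hrow

-- one row of A's loop: invariant step and num_entries bookkeeping, given that no
-- still-sentinel column whose first '.' was at row 10 is re-hit in this row
lemma fbf_step_all (gb : List (List String)) (rc : Nat) (r : List String) (bf : List Int)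
    (hr? : gb[rc]? = some r) (hrlen : rc < gb.length) (hlen : bf.length = 7)
    (hinv : ∀ j : Nat, j < 7 → bf.getD j 0 = fbfFirstDot j (List.take rc gb) 0)
    (Hsent : ∀ j : Nat, j < 7 →
      (List.take rc gb).findIdx? (fun row => row[j]? == some ".") = some 10 →
      ¬ (r[j]? = some ".")) :
    (∀ j : Nat, j < 7 →
      (fbfUpd r bf ((rc : Nat) : Int)).getD j 0 = fbfFirstDot j (List.take (rc + 1) gb) 0) ∧
    (List.range 7).countP (fun j => (List.take rc gb).all (fun row => !(row[j]? == some ".")))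
      = fbfWrote r bf + (List.range 7).countP
          (fun j => (List.take (rc + 1) gb).all (fun row => !(row[j]? == some "."))) := by
  have htake1 : List.take (rc + 1) gb = List.take rc gb ++ [r] := by
    rw [List.take_add_one, hr?]
    rfl
  have hlentake : (List.take rc gb).length = rc := by
    simp [List.length_take]
    omega
  have hnone_bf : ∀ j : Nat, j < 7 →
      (List.take rc gb).findIdx? (fun row => row[j]? == some ".") = none →
      bf.getD j 0 = 10 := by
    intro j hj hidx
    have hfd := hinv j hj
    rw [fbfFirstDot_eq, hidx] at hfd
    simpa using hfd
  have hprefix10 : ∀ j : Nat, j < 7 → bf.getD j 0 = 10 → r[j]? = some "." →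
      (List.take rc gb).findIdx? (fun row => row[j]? == some ".") = none := by
    intro j hj hbf hhit
    have hfd := hinv j hj
    rw [fbfFirstDot_eq] at hfd
    cases hidx : (List.take rc gb).findIdx? (fun row => row[j]? == some ".") with
    | none => rfl
    | some i =>
      rw [hidx] at hfd
      simp only [Option.elim_some] at hfd
      rw [hbf] at hfd
      have hi10 : i = 10 := by omega
      subst hi10
      exact absurd hhit (Hsent j hj hidx)
  constructor
  · intro j hj
    rw [fbfUpd_getD r bf ((rc : Nat) : Int) j (by rw [hlen]; omega)]
    rw [fbfFirstDot_eq, htake1, List.findIdx?_append]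
    cases hidx : (List.take rc gb).findIdx? (fun row => row[j]? == some ".") with
    | some i =>
      have hbfj : bf.getD j 0 = (i : Int) := by
        have := hinv j hj
        rw [fbfFirstDot_eq, hidx] at this
        simpa using this
      by_cases hi : i = 10
      · subst hi
        have hnohit : ¬ (r[j]? = some ".") := Hsent j hj hidx
        rw [if_neg (fun h => hnohit h.1), hbfj]
        simp
      · have hcond : ¬ (r[j]? = some "." ∧ bf.getD j 0 = 10) := by
          rintro ⟨-, h2⟩
          rw [hbfj] at h2
          omega
        rw [if_neg hcond, hbfj]
        simp
    | none =>
      have hbfj : bf.getD j 0 = 10 := hnone_bf j hj hidx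
      by_cases hhit : r[j]? = some "."
      · rw [if_pos ⟨hhit, hbfj⟩]
        simp [List.findIdx?_cons, hhit, hlentake]
      · rw [if_neg (fun h => hhit h.1), hbfj]
        simp [List.findIdx?_cons, hhit]
  · rw [fbfWrote_eq bf r, hlen]
    rw [fbf_countP_split (List.range 7)
      (fun j => (List.take rc gb).all (fun row => !(row[j]? == some ".")))
      (fun j => r[j]? == some ".")]
    congr 1
    · apply List.countP_congr
      intro j hjmem
      have hj : j < 7 := by simpa using hjmem
      simp only [Bool.and_eq_true, decide_eq_true_eq, List.all_eq_true, Bool.not_eq_eq_eq_not,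
        Bool.not_true, beq_eq_false_iff_ne, ne_eq, beq_iff_eq]
      constructor
      · rintro ⟨hall, hhit⟩
        refine ⟨hhit, hnone_bf j hj ?_⟩
        rw [List.findIdx?_eq_none_iff]
        intro x hx
        simpa using hall x hx
      · rintro ⟨hhit, hbf10⟩
        have hidx := hprefix10 j hj hbf10 hhit
        rw [List.findIdx?_eq_none_iff] at hidx
        exact ⟨fun x hx => by simpa using hidx x hx, hhit⟩
    · apply List.countP_congr
      intro j hjmem
      simp [htake1, List.all_append, and_comm]

lemma fbf_outer_main (gb : List (List String))
    (Hpre : ∀ r ∈ gb, ∀ i : Nat, r[i]? = some "." → i < 7)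
    (HD : ¬ D_find_battle_front gb) :
    ∀ (rs : List (List String)) (rc : Nat) (bf : List Int),
      rs = List.drop rc gb →
      bf.length = 7 →
      (∀ j : Nat, j < 7 → bf.getD j 0 = fbfFirstDot j (List.take rc gb) 0) →
      (∃ c < 7, ∀ row ∈ gb.take rc, ¬ (row[c]? = some ".")) →
      fbfOuter rs bf
        ((((List.range 7).countP
            (fun j => (List.take rc gb).all (fun row => !(row[j]? == some ".")))) : Nat) : Int)
        ((rc : Nat) : Int)
        = some ((List.range 7).map (fun j => fbfFirstDot j gb 0)) := by
  intro rs
  induction rs with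
  | nil =>
    intro rc bf hdrop hlen hinv _
    have hge : gb.length ≤ rc := List.drop_eq_nil_iff.mp hdrop.symm
    have htake : List.take rc gb = gb := List.take_of_length_le hge
    simp only [fbfOuter]
    congr 1
    apply List.ext_getElem (by simp [hlen])
    intro i h1 h2
    have hi7 : i < 7 := by simp [hlen] at h1; exact h1
    have hbfi := hinv i hi7
    rw [htake] at hbfi
    rw [← List.getD_eq_getElem bf 0 h1, hbfi]
    simp
  | cons r rs' ih =>
    intro rc bf hdrop hlen hinv Hrun
    have hrlen : rc < gb.length := by
      by_contra h
      have h2 : List.drop rc gb = [] := List.drop_eq_nil_iff.mpr (by omega)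
      rw [← hdrop] at h2
      simp at h2
    have hr? : gb[rc]? = some r := by
      have h0 : (List.drop rc gb)[0]? = some r := by rw [← hdrop]; rfl
      rw [List.getElem?_drop] at h0
      simpa using h0
    have hrmem : r ∈ gb := List.mem_of_getElem? hr?
    have hdrop' : rs' = List.drop (rc + 1) gb := by
      have h0 : (List.drop rc gb).tail = List.drop (rc + 1) gb := by
        rw [List.tail_drop]
      rw [← hdrop] at h0
      simpa using h0
    have hpre_r : ∀ i : Nat, r[i]? = some "." → i < bf.length := by
      intro i hi
      rw [hlen]
      exact Hpre r hrmem i hi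
    have hinner : ∀ ne : Int,
        fbfInner r bf 0 ne ((rc : Nat) : Int)
          = some (fbfUpd r bf ((rc : Nat) : Int), ne - ((fbfWrote r bf : Nat) : Int)) := by
      intro ne
      have hd := fbfInner_decomp r [] bf ne ((rc : Nat) : Int)
      simp only [List.nil_append, List.length_nil, Nat.cast_zero] at hd
      rw [hd, fbfInner0_eq r bf ne ((rc : Nat) : Int) hpre_r]
      simp
    have Hsent : ∀ j : Nat, j < 7 →
        (List.take rc gb).findIdx? (fun row => row[j]? == some ".") = some 10 →
        ¬ (r[j]? = some ".") := fun j hj hidx hhit =>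
      HD (fbfD_of gb j rc r hj hidx hr? hhit Hrun)
    obtain ⟨hstep, hcnt⟩ := fbf_step_all gb rc r bf hr? hrlen hlen hinv Hsent
    simp only [fbfOuter, hinner]
    have hne' : (((List.range 7).countP
          (fun j => (List.take rc gb).all (fun row => !(row[j]? == some "."))) : Nat) : Int)
          - ((fbfWrote r bf : Nat) : Int)
        = (((List.range 7).countP
          (fun j => (List.take (rc + 1) gb).all (fun row => !(row[j]? == some "."))) : Nat) : Int) := by
      omega
    rw [hne']
    by_cases hz : (List.range 7).countP
        (fun j => (List.take (rc + 1) gb).all (fun row => !(row[j]? == some "."))) = 0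
    · rw [if_pos (by rw [hz]; rfl)]
      congr 1
      apply List.ext_getElem (by simp [fbfUpd_length, hlen])
      intro i h1 h2
      have hi7 : i < 7 := by
        rw [fbfUpd_length, hlen] at h1
        exact h1
      rw [← List.getD_eq_getElem _ 0 h1, hstep i hi7]
      rw [List.countP_eq_zero] at hz
      have hnp := hz i (by simpa using hi7)
      cases hidx : (List.take (rc + 1) gb).findIdx? (fun row => row[i]? == some ".") with
      | none =>
        exfalso
        rw [List.findIdx?_eq_none_iff] at hidx
        apply hnp
        rw [List.all_eq_true]
        intro x hx
        simpa using hidx x hx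
      | some k =>
        have hfull : gb.findIdx? (fun row => row[i]? == some ".") = some k := by
          conv_lhs => rw [← List.take_append_drop (rc + 1) gb]
          rw [List.findIdx?_append, hidx]
          rfl
        rw [fbfFirstDot_eq, hidx]
        simp [fbfFirstDot_eq, hfull]
    · rw [if_neg (by simpa using hz)]
      have hrc1 : ((rc : Nat) : Int) + 1 = (((rc + 1 : Nat) : Nat) : Int) := by push_cast; ring
      rw [hrc1]
      have Hrun' : ∃ c < 7, ∀ row ∈ gb.take (rc + 1), ¬ (row[c]? = some ".") := by
        by_contra hcon
        apply hz
        rw [List.countP_eq_zero]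
        intro c hcmem
        have hc7 : c < 7 := by simpa using hcmem
        have hcon' : ¬ ∀ row ∈ gb.take (rc + 1), ¬ (row[c]? = some ".") :=
          fun hall => hcon ⟨c, hc7, hall⟩
        rw [not_forall] at hcon'
        obtain ⟨row, hrow⟩ := hcon'
        rw [Classical.not_imp] at hrow
        obtain ⟨hrowmem, hrowhit⟩ := hrow
        rw [not_not] at hrowhit
        simp only [List.all_eq_true, Bool.not_eq_eq_eq_not, Bool.not_true, not_forall]
        exact ⟨row, hrowmem, by simpa using hrowhit⟩
      exact ih (rc + 1) (fbfUpd r bf ((rc : Nat) : Int)) hdrop'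
        (by rw [fbfUpd_length]; exact hlen) hstep Hrun'

-- A's loop never raises and never rewrites an entry that already left the sentinel
lemma fbf_tail : ∀ (rs : List (List String)) (bf : List Int) (ne rc : Int),
    bf.length = 7 → (∀ r ∈ rs, ∀ i : Nat, r[i]? = some "." → i < 7) →
    ∃ out : List Int, fbfOuter rs bf ne rc = some out ∧
      (∀ c : Nat, c < 7 → bf.getD c 0 ≠ 10 → out.getD c 0 = bf.getD c 0) := by
  intro rs
  induction rs with
  | nil => intro bf ne rc _ _; exact ⟨bf, rfl, fun c _ _ => rfl⟩
  | cons r rs' ih =>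
    intro bf ne rc hlen hpre
    have hpre_r : ∀ i : Nat, r[i]? = some "." → i < bf.length := by
      intro i hi
      rw [hlen]
      exact hpre r (by simp) i hi
    have hinner : fbfInner r bf 0 ne rc
        = some (fbfUpd r bf rc, ne - ((fbfWrote r bf : Nat) : Int)) := by
      have hd := fbfInner_decomp r [] bf ne rc
      simp only [List.nil_append, List.length_nil, Nat.cast_zero] at hd
      rw [hd, fbfInner0_eq r bf ne rc hpre_r]
      simp
    have hpres : ∀ c : Nat, c < 7 → bf.getD c 0 ≠ 10 →
        (fbfUpd r bf rc).getD c 0 = bf.getD c 0 := by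
      intro c hc hne10
      rw [fbfUpd_getD r bf rc c (by rw [hlen]; omega)]
      rw [if_neg (fun h => hne10 h.2)]
    simp only [fbfOuter, hinner]
    by_cases hz : ne - ((fbfWrote r bf : Nat) : Int) = 0
    · rw [if_pos hz]
      exact ⟨fbfUpd r bf rc, rfl, hpres⟩
    · rw [if_neg hz]
      obtain ⟨out, h1, h3⟩ := ih (fbfUpd r bf rc) _ (rc + 1)
        (by rw [fbfUpd_length]; exact hlen)
        (fun r' hr' => hpre r' (by simp [hr']))
      refine ⟨out, h1, fun c hc hne10 => ?_⟩
      rw [h3 c hc (by rw [hpres c hc hne10]; exact hne10), hpres c hc hne10]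

-- before the first sentinel re-hit row m, and while some column is empty up to m,
-- A's loop runs exactly in the pure first-hit regime and reaches the state at row m
lemma fbf_reach (gb : List (List String)) (m : Nat)
    (Hpre : ∀ r ∈ gb, ∀ i : Nat, r[i]? = some "." → i < 7)
    (Hnosecond : ∀ k : Nat, 11 ≤ k → k < m → ∀ c : Nat, c < 7 →
        (List.take k gb).findIdx? (fun row => row[c]? == some ".") = some 10 →
        ∀ r' : List String, gb[k]? = some r' → ¬ (r'[c]? = some "."))
    (HnoBreak : ∃ c < 7, ∀ row ∈ gb.take m, ¬ (row[c]? = some ".")) :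
    ∀ (n rc : Nat) (bf : List Int), m - rc = n → rc ≤ m → m ≤ gb.length →
      bf.length = 7 →
      (∀ j : Nat, j < 7 → bf.getD j 0 = fbfFirstDot j (List.take rc gb) 0) →
      fbfOuter (List.drop rc gb) bf
        ((((List.range 7).countP
            (fun j => (List.take rc gb).all (fun row => !(row[j]? == some ".")))) : Nat) : Int)
        ((rc : Nat) : Int)
      = fbfOuter (List.drop m gb)
          ((List.range 7).map (fun j => fbfFirstDot j (List.take m gb) 0))
          ((((List.range 7).countP
            (fun j => (List.take m gb).all (fun row => !(row[j]? == some ".")))) : Nat) : Int)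
          ((m : Nat) : Int) := by
  intro n
  induction n with
  | zero =>
    intro rc bf h0 hle _ hlen hinv
    have hrcm : rc = m := by omega
    subst hrcm
    have hbf : bf = (List.range 7).map (fun j => fbfFirstDot j (List.take rc gb) 0) := by
      apply List.ext_getElem (by simp [hlen])
      intro i h1 h2
      have hi7 : i < 7 := by simp [hlen] at h1; exact h1
      rw [← List.getD_eq_getElem bf 0 h1, hinv i hi7]
      simp
    rw [hbf]
  | succ n ihn =>
    intro rc bf h0 hle hm hlen hinv
    have hrcm : rc < m := by omega
    have hrlen : rc < gb.length := by omega
    obtain ⟨r, hr?⟩ : ∃ r, gb[rc]? = some r :=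
      ⟨gb[rc], List.getElem?_eq_some_iff.mpr ⟨hrlen, rfl⟩⟩
    have hrmem : r ∈ gb := List.mem_of_getElem? hr?
    have hdropc : List.drop rc gb = r :: List.drop (rc + 1) gb := by
      rw [List.drop_eq_getElem_cons hrlen]
      obtain ⟨hx, h2⟩ := List.getElem?_eq_some_iff.mp hr?
      exact congrArg (fun x => x :: List.drop (rc + 1) gb) h2
    have hpre_r : ∀ i : Nat, r[i]? = some "." → i < bf.length := by
      intro i hi
      rw [hlen]
      exact Hpre r hrmem i hi
    have hinner : ∀ ne : Int,
        fbfInner r bf 0 ne ((rc : Nat) : Int)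
          = some (fbfUpd r bf ((rc : Nat) : Int), ne - ((fbfWrote r bf : Nat) : Int)) := by
      intro ne
      have hd := fbfInner_decomp r [] bf ne ((rc : Nat) : Int)
      simp only [List.nil_append, List.length_nil, Nat.cast_zero] at hd
      rw [hd, fbfInner0_eq r bf ne ((rc : Nat) : Int) hpre_r]
      simp
    have Hsent : ∀ j : Nat, j < 7 →
        (List.take rc gb).findIdx? (fun row => row[j]? == some ".") = some 10 →
        ¬ (r[j]? = some ".") := by
      intro j hj hidx
      have hrc11 : 11 ≤ rc := by
        obtain ⟨h10, -, -⟩ := List.findIdx?_eq_some_iff_getElem.mp hidx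
        simp [List.length_take] at h10
        omega
      exact Hnosecond rc hrc11 hrcm j hj hidx r hr?
    obtain ⟨hstep, hcnt⟩ := fbf_step_all gb rc r bf hr? hrlen hlen hinv Hsent
    rw [hdropc]
    simp only [fbfOuter, hinner]
    have hne' : (((List.range 7).countP
          (fun j => (List.take rc gb).all (fun row => !(row[j]? == some "."))) : Nat) : Int)
          - ((fbfWrote r bf : Nat) : Int)
        = (((List.range 7).countP
          (fun j => (List.take (rc + 1) gb).all (fun row => !(row[j]? == some "."))) : Nat) : Int) := by
      omega
    rw [hne']
    have hz : (List.range 7).countP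
        (fun j => (List.take (rc + 1) gb).all (fun row => !(row[j]? == some "."))) ≠ 0 := by
      obtain ⟨c0, hc0, hnone⟩ := HnoBreak
      intro hzero
      rw [List.countP_eq_zero] at hzero
      apply hzero c0 (by simpa using hc0)
      rw [List.all_eq_true]
      intro row hrow
      have hrow' : row ∈ List.take m gb := by
        have hsub : List.take (rc + 1) gb = List.take (rc + 1) (List.take m gb) := by
          rw [List.take_take]
          congr 1
          omega
        rw [hsub] at hrow
        exact List.mem_of_mem_take hrow
      simpa using hnone row hrow'
    rw [if_neg (by simpa using hz)]
    have hrc1 : ((rc : Nat) : Int) + 1 = (((rc + 1 : Nat) : Nat) : Int) := by push_cast; ring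
    rw [hrc1]
    exact ihn (rc + 1) (fbfUpd r bf ((rc : Nat) : Int)) (by omega) (by omega) hm
      (by rw [fbfUpd_length]; exact hlen) hstep

-- ===== VERDICT =====
theorem find_battle_front_spec : Claim_unchanged_find_battle_front := by
  intro gb _hdom hpre hD
  have Hpre := fbf_pre_hits gb hpre
  have hinv : ∀ j : Nat, j < 7 →
      ((List.range 7).map (fun _ => (10 : Int))).getD j 0 = fbfFirstDot j (List.take 0 gb) 0 := by
    intro j hj
    interval_cases j <;> simp [fbfFirstDot]
  have hmain := fbf_outer_main gb Hpre hD gb 0 ((List.range 7).map (fun _ => (10 : Int)))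
    (by simp) (by simp) hinv ⟨0, by norm_num, by simp⟩
  norm_num at hmain
  unfold find_battle_front find_battle_front_alt
  have hrep : List.map (fun _ => (10 : Int)) (List.range 7) = List.replicate 7 10 := by simp
  rw [hrep, hmain]
  rfl

theorem find_battle_front_changed : Claim_changed_find_battle_front := by
  unfold Claim_changed_find_battle_front; decide

theorem find_battle_front_tight : Claim_exact_find_battle_front := by
  intro gb _hdom hpre hD
  have Hpre := fbf_pre_hits gb hpre
  obtain ⟨j, hjmem, i, _himem, hjfull, hjsecond, hmin, c0, hc0mem, hc0none⟩ := hD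
  have hj7 : j < 7 := by simpa using hjmem
  obtain ⟨hlt, hp, _hbefore⟩ := List.findIdx?_eq_some_iff_getElem.mp hjsecond
  have hmlen : 11 + i < gb.length := by simp at hlt; omega
  have hrm? : gb[11 + i]? = some ((gb.drop 11)[i]'hlt) := by
    rw [← List.getElem?_drop]
    exact List.getElem?_eq_some_iff.mpr ⟨hlt, rfl⟩
  have hrhit : ((gb.drop 11)[i]'hlt)[j]? = some "." := by simpa using hp
  have Hnosecond : ∀ k : Nat, 11 ≤ k → k < 11 + i → ∀ c : Nat, c < 7 →
      (List.take k gb).findIdx? (fun row => row[c]? == some ".") = some 10 →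
      ∀ r' : List String, gb[k]? = some r' → ¬ (r'[c]? = some ".") := by
    intro k hk11 hkm c hc7 hcidx r' hr' hhit'
    have hcfull : gb.findIdx? (fun row => row[c]? == some ".") = some 10 :=
      fbf_findIdx?_take_some hcidx
    have hd : (gb.drop 11)[k - 11]? = some r' := by
      rw [List.getElem?_drop]
      rw [show 11 + (k - 11) = k by omega]
      exact hr'
    obtain ⟨i'', hi''le, hi''⟩ := fbf_findIdx?_le (fun row => row[c]? == some ".")
      (gb.drop 11) (k - 11) r' hd (by simpa using hhit')
    have hi''len : i'' < gb.length := by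
      obtain ⟨hl, -, -⟩ := List.findIdx?_eq_some_iff_getElem.mp hi''
      simp at hl
      omega
    have := hmin c (by simpa using hc7) i'' (by simpa using hi''len) hcfull hi''
    omega
  have HnoBreak : ∃ c < 7, ∀ row ∈ gb.take (11 + i), ¬ (row[c]? = some ".") :=
    ⟨c0, by simpa using hc0mem, hc0none⟩
  have hinv0 : ∀ j' : Nat, j' < 7 →
      ((List.range 7).map (fun _ => (10 : Int))).getD j' 0 = fbfFirstDot j' (List.take 0 gb) 0 := by
    intro j' hj'
    interval_cases j' <;> simp [fbfFirstDot]
  have hreach := fbf_reach gb (11 + i) Hpre Hnosecond HnoBreak (11 + i) 0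
    ((List.range 7).map (fun _ => (10 : Int))) (by omega) (by omega) (by omega) (by simp) hinv0
  simp only [List.drop_zero, Nat.cast_zero, List.take_zero, List.all_nil, List.countP_true,
    List.length_range, Nat.cast_ofNat] at hreach
  set BFM := (List.range 7).map (fun j' => fbfFirstDot j' (List.take (11 + i) gb) 0) with hBFMdef
  have hBFMlen : BFM.length = 7 := by simp [hBFMdef]
  have hBFMj : BFM.getD j 0 = 10 := by
    rw [hBFMdef, List.getD_eq_getElem _ _ (by simpa using hj7)]
    simp only [List.getElem_map, List.getElem_range]
    rw [fbfFirstDot_eq, fbf_findIdx?_full_to_take hjfull (by omega)]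
    simp
  have hrmem : ((gb.drop 11)[i]'hlt) ∈ gb := List.mem_of_getElem? hrm?
  have hdropm : List.drop (11 + i) gb = ((gb.drop 11)[i]'hlt) :: List.drop (11 + i + 1) gb := by
    rw [List.drop_eq_getElem_cons hmlen]
    obtain ⟨hx, h2⟩ := List.getElem?_eq_some_iff.mp hrm?
    exact congrArg (fun x => x :: List.drop (11 + i + 1) gb) h2
  have hpre_r : ∀ i' : Nat, ((gb.drop 11)[i]'hlt)[i']? = some "." → i' < BFM.length := by
    intro i' hi'
    rw [hBFMlen]
    exact Hpre _ hrmem i' hi'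
  have hinner : ∀ ne : Int,
      fbfInner ((gb.drop 11)[i]'hlt) BFM 0 ne ((11 + i : Nat) : Int)
        = some (fbfUpd ((gb.drop 11)[i]'hlt) BFM ((11 + i : Nat) : Int),
            ne - ((fbfWrote ((gb.drop 11)[i]'hlt) BFM : Nat) : Int)) := by
    intro ne
    have hd := fbfInner_decomp ((gb.drop 11)[i]'hlt) [] BFM ne ((11 + i : Nat) : Int)
    simp only [List.nil_append, List.length_nil, Nat.cast_zero] at hd
    rw [hd, fbfInner0_eq _ BFM ne ((11 + i : Nat) : Int) hpre_r]
    simp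
  have hupdj : (fbfUpd ((gb.drop 11)[i]'hlt) BFM ((11 + i : Nat) : Int)).getD j 0
      = ((11 + i : Nat) : Int) := by
    rw [fbfUpd_getD _ _ _ j (by rw [hBFMlen]; omega)]
    rw [if_pos ⟨hrhit, hBFMj⟩]
  have hAval : ∃ out : List Int, find_battle_front gb = out ∧
      out.getD j 0 = ((11 + i : Nat) : Int) := by
    unfold find_battle_front
    rw [hreach, hdropm]
    simp only [fbfOuter, hinner]
    by_cases hz : (((List.range 7).countP
          (fun j' => (List.take (11 + i) gb).all (fun row => !(row[j']? == some ".")))) : Int)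
          - ((fbfWrote ((gb.drop 11)[i]'hlt) BFM : Nat) : Int) = 0
    · rw [if_pos hz]
      exact ⟨_, rfl, hupdj⟩
    · rw [if_neg hz]
      obtain ⟨out, h1, h3⟩ := fbf_tail (List.drop (11 + i + 1) gb)
        (fbfUpd ((gb.drop 11)[i]'hlt) BFM ((11 + i : Nat) : Int)) _ (((11 + i : Nat) : Int) + 1)
        (by rw [fbfUpd_length, hBFMlen])
        (fun r' hr' i' hi' => Hpre r' (List.mem_of_mem_drop hr') i' hi')
      rw [h1]
      refine ⟨out, by simp, ?_⟩
      rw [h3 j hj7 (by rw [hupdj]; intro hc; omega), hupdj]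
  obtain ⟨out, hAeq, hAj⟩ := hAval
  have hBj : (find_battle_front_alt gb).getD j 0 = 10 := by
    unfold find_battle_front_alt
    rw [List.getD_eq_getElem _ _ (by simpa using hj7)]
    simp only [List.getElem_map, List.getElem_range]
    rw [fbfFirstDot_eq, hjfull]
    simp
  intro heq
  rw [hAeq] at heq
  rw [heq, hBj] at hAj
  omega
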